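-- pv_equiv track=rewrite | github.com/MrNquyen/Grammar-Checker | utils/excel_utils.py | convert_coor_to_cell_string
-- ===== SOURCE A (Python) =====
-- def convert_coor_to_cell_string(x, y):
--     # 1-based index coordinates
--     x = x + 1
--     y = y + 1
--
--     # Convert
--     y_str = ""
--     while y > 0:
--         y, remainder = divmod(y - 1, 26)
--         y_str = chr(65 + remainder) + y_str
--     cell_str = f"{y_str}{x}"
--     return cell_str
-- ===== SOURCE B (Python) =====
-- def convert_coor_to_cell_string(x, y):
--     # column = bijective base-26 digits of y+1, collected least-significant first,
--     # then rendered most-significant first; row is just x+1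
--     def digits(n):
--         if n <= 0:
--             return []
--         q, r = divmod(n - 1, 26)
--         return [r] + digits(q)
--     col = ''.join(chr(65 + d) for d in reversed(digits(y + 1)))
--     return col + str(x + 1)
-- ===== Notes on version B (the rewrite author's own statement) =====
-- stated objective: alternative
-- what changed: Instead of a while-loop that mutates y and prepends characters to a string accumulator, B recursively collects the bijective-base-26 digit values into a list (least-significant first) and renders the column by reversing that list and mapping digits to letters.
import Mathlib
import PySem

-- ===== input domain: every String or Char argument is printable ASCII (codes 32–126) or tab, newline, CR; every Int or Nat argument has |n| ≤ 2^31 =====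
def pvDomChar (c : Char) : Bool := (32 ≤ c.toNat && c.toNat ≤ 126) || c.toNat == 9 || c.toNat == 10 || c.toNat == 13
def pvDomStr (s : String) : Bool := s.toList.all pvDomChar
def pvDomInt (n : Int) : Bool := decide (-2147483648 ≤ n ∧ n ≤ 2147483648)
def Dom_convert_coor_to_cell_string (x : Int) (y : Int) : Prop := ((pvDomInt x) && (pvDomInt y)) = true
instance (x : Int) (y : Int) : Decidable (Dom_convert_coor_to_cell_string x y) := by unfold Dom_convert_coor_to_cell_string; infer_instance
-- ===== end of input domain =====

-- B replaces A's string-prepending while loop by a recursive digit-list collector (alternative decomposition, same cost).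

-- ===== PORT A =====
-- the while loop: y, remainder = divmod(y-1, 26); y_str = chr(65+remainder) + y_str
def pvLoopA (y : Int) (ystr : String) : String :=
  if _h : 0 < y then
    pvLoopA (PySem.Int.floordiv (y - 1) 26)
      (String.ofList [Char.ofNat (65 + (PySem.Int.mod (y - 1) 26)).toNat] ++ ystr)
  else ystr
termination_by y.toNat
decreasing_by
  have h1 : PySem.Int.floordiv (y - 1) 26 = (y - 1) / 26 :=
    PySem.Int.floordiv_eq_ediv_of_pos (by omega)
  have h2 : (y - 1) / 26 ≤ y - 1 := Int.ediv_le_self _ (by omega)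
  have h3 : 0 ≤ (y - 1) / 26 := Int.ediv_nonneg (by omega) (by omega)
  omega

def convert_coor_to_cell_string (x : Int) (y : Int) : String :=
  let x := x + 1
  let y := y + 1
  let ystr := pvLoopA y ""
  ystr ++ PySem.Int.toStr x

-- ===== PORT B =====
-- def digits(n): if n <= 0: return []; q, r = divmod(n-1, 26); return [r] + digits(q)
def pvDigits (n : Int) : List Int :=
  if h : n ≤ 0 then []
  else PySem.Int.mod (n - 1) 26 :: pvDigits (PySem.Int.floordiv (n - 1) 26)
termination_by n.toNat
decreasing_by
  have h1 : PySem.Int.floordiv (n - 1) 26 = (n - 1) / 26 :=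
    PySem.Int.floordiv_eq_ediv_of_pos (by omega)
  have h2 : (n - 1) / 26 ≤ n - 1 := Int.ediv_le_self _ (by omega)
  have h3 : 0 ≤ (n - 1) / 26 := Int.ediv_nonneg (by omega) (by omega)
  omega

-- ''.join(chr(65 + d) for d in reversed(digits(y + 1))) + str(x + 1)
def convert_coor_to_cell_string_alt (x : Int) (y : Int) : String :=
  String.ofList ((pvDigits (y + 1)).reverse.map (fun d => Char.ofNat (65 + d).toNat))
    ++ PySem.Int.toStr (x + 1)

-- ===== PRECONDITION & SPEC =====
def Spec_convert_coor_to_cell_string (x : Int) (y : Int) (out : String) : Prop := out = convert_coor_to_cell_string_alt x y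
instance (x : Int) (y : Int) (out : String) : Decidable (Spec_convert_coor_to_cell_string x y out) := by unfold Spec_convert_coor_to_cell_string; infer_instance

-- ===== CLAIM (what is proved, stated in full; the proofs are below) =====
def Claim_equal_convert_coor_to_cell_string : Prop := ∀ (x : Int) (y : Int), Dom_convert_coor_to_cell_string x y → Spec_convert_coor_to_cell_string x y (convert_coor_to_cell_string x y)

-- ===== LEMMAS AND PROOFS =====
theorem pvLoopA_eq_digits (y : Int) (acc : String) :
    pvLoopA y acc
      = String.ofList ((pvDigits y).reverse.map (fun d => Char.ofNat (65 + d).toNat)) ++ acc := by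
  induction y, acc using pvLoopA.induct with
  | case1 y acc h ih =>
      rw [pvLoopA, pvDigits]
      simp only [h, dif_pos, dif_neg (by omega : ¬ y ≤ 0)]
      rw [ih]
      simp [String.ofList_append, String.append_assoc]
  | case2 y acc h =>
      rw [pvLoopA, pvDigits]
      simp only [h, dif_pos (by omega : y ≤ 0)]
      simp

-- ===== VERDICT (by name: the statement is the Claim_ definition above) =====
theorem convert_coor_to_cell_string_spec : Claim_equal_convert_coor_to_cell_string := by
  intro x y _
  unfold Spec_convert_coor_to_cell_string convert_coor_to_cell_string convert_coor_to_cell_string_alt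
  simp [pvLoopA_eq_digits]
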